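-- pv_equiv track=rewrite | github.com/antimike/Physics_Python | Exercises/shortest-addition-chain.py | construct_doubling_sequence
-- ===== SOURCE A (Python) =====
-- def count_binary_digits(num, zeros_factor=1, ones_factor=1):
--     """
--     >>> count_binary_digits(11)
--     4
--     >>> count_binary_digits(11, ones_factor=2)
--     7
--     >>> count_binary_digits(11, ones_factor=1, zeros_factor=2)
--     5
--     >>> count_binary_digits(15, ones_factor=2)
--     8
--     """
--     count = 0
--     while num:
--         # if count_ones_as_extra:
--             # count += num % 2
--         digit = num % 2
--         count += digit*ones_factor + (1^digit)*zeros_factor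
--         num >>= 1
--     return count
--
-- def construct_doubling_sequence(target):
--     """
--     >>> construct_doubling_sequence(11)
--     [1, 2, 4, 5, 10, 11]
--     >>> construct_doubling_sequence(15)
--     [1, 2, 3, 6, 7, 14, 15]
--     """
--     num_digits = count_binary_digits(target)
--     ret = []
--     for j in range(1, num_digits + 1):
--         shift = num_digits - j
--         ret.extend(sorted(
--             {ret[-1] << 1 if len(ret) != 0 else 1, target >> shift}
--         ))
--     return ret
-- ===== SOURCE B (Python) =====
-- def construct_doubling_sequence(target):
--     out = []
--     n = target
--     while n > 1:
--         out.append(n)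
--         if n % 2:
--             out.append(n - 1)
--         n //= 2
--     if n == 1:
--         out.append(1)
--     out.reverse()
--     return out
-- ===== Notes on version B (the rewrite author's own statement) =====
-- stated objective: alternative
-- what changed: B descends from the target by repeated halving, appending the current value (and its predecessor on odd values) in descending order and reversing once at the end, instead of A's forward MSB-to-LSB pass that recomputes target>>shift each step and dedups with sorted(set(...)).
import Mathlib
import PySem

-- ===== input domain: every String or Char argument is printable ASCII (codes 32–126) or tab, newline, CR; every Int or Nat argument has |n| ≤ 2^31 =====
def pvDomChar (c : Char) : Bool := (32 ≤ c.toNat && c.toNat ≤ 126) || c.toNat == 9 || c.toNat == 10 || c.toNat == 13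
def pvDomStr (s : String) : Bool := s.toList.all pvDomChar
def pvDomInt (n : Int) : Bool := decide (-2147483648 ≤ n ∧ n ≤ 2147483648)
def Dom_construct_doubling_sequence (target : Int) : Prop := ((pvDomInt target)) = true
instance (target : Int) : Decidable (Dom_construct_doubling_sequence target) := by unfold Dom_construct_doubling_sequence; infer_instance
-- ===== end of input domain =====

-- B replaces A's forward MSB-to-LSB pass (recomputing target >> shift and deduping with
-- sorted(set(...))) by a halving descent from the target that emits values in descending
-- order and reverses once at the end (objective: alternative).

-- ===== PORT A =====
-- while num: … ; the fuel argument only makes the loop total (num.toNat + 1 steps always suffice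
-- for num ≥ 0; for num < 0 Python loops forever — those inputs are excluded by Pre_).
def cbd_loop (fuel : Nat) (num zeros_factor ones_factor count : Int) : Int :=
  match fuel with
  | 0 => count
  | fuel + 1 =>
    if num = 0 then count
    else
      let digit := PySem.Int.mod num 2
      cbd_loop fuel (PySem.Int.floordiv num 2) zeros_factor ones_factor
        (count + (digit * ones_factor + (PySem.Int.bxor 1 digit) * zeros_factor))

def count_binary_digits (num : Int) (zeros_factor ones_factor : Int) : Int :=
  cbd_loop (num.toNat + 1) num zeros_factor ones_factor 0

def construct_doubling_sequence (target : Int) : List Int :=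
  let num_digits := count_binary_digits target 1 1
  (PySem.List.pyRange 1 (num_digits + 1) 1).foldl
    (fun ret j =>
      let shift := num_digits - j
      -- shift = num_digits - j ≥ 0 throughout the loop, so `target >> shift` is `>>> shift.toNat`;
      -- ret[-1] is guarded by len(ret) != 0, so the `.getD 0` default is never taken
      ret ++ PySem.List.sorted
        (PySem.Set.ofList
          [if ret.length ≠ 0 then ((PySem.List.pyGet? ret (-1)).getD 0) <<< (1 : Nat) else 1,
           target >>> shift.toNat])
        (fun x => x) false)
    []

-- ===== PORT B =====
-- while n > 1: out.append(n); if n % 2: out.append(n-1); n //= 2 — the fuel argument only makes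
-- the loop total (n.toNat + 1 steps always suffice, since n strictly decreases while n > 1).
def cds_descend (fuel : Nat) (n : Int) (out : List Int) : Int × List Int :=
  match fuel with
  | 0 => (n, out)
  | fuel + 1 =>
    if 1 < n then
      cds_descend fuel (PySem.Int.floordiv n 2)
        (out ++ [n] ++ (if PySem.Int.mod n 2 ≠ 0 then [n - 1] else []))
    else (n, out)

def construct_doubling_sequence_alt (target : Int) : List Int :=
  let st := cds_descend (target.toNat + 1) target []
  (if st.1 = 1 then st.2 ++ [1] else st.2).reverse

-- ===== PRECONDITION & SPEC =====
-- A's while loop never terminates for negative targets (num >>= 1 stalls at -1), so A only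
-- returns on nonnegative inputs.
def Pre_construct_doubling_sequence (target : Int) : Prop := 0 ≤ target
instance (target : Int) : Decidable (Pre_construct_doubling_sequence target) := by
  unfold Pre_construct_doubling_sequence; infer_instance

def pvWitness_construct_doubling_sequence : Int := 11

def Spec_construct_doubling_sequence (target : Int) (out : List Int) : Prop :=
  out = construct_doubling_sequence_alt target
instance (target : Int) (out : List Int) : Decidable (Spec_construct_doubling_sequence target out) := by
  unfold Spec_construct_doubling_sequence; infer_instance

-- ===== CLAIM (what is proved, stated in full; the proofs are below) =====
def Claim_equal_construct_doubling_sequence : Prop :=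
  ∀ (target : Int), Dom_construct_doubling_sequence target →
    Pre_construct_doubling_sequence target →
    Spec_construct_doubling_sequence target (construct_doubling_sequence target)


-- ===== LEMMAS AND PROOFS =====

-- the common shape of both programs' output on a positive target
def chain (m : Nat) : List Int :=
  if m ≤ 1 then (if m = 1 then [1] else [])
  else chain (m / 2) ++ (if m % 2 = 1 then [(m : Int) - 1, (m : Int)] else [(m : Int)])
termination_by m
decreasing_by omega

theorem chain_rec (m : Nat) (h : 2 ≤ m) :
    chain m = chain (m / 2) ++ (if m % 2 = 1 then [(m : Int) - 1, (m : Int)] else [(m : Int)]) := by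
  rw [chain]; simp [show ¬ m ≤ 1 by omega]

theorem chain_last (m : Nat) (h : 1 ≤ m) : (chain m).getLast? = some (m : Int) := by
  by_cases h1 : m = 1
  · subst h1; rw [chain]; simp
  · rw [chain_rec m (by omega)]
    rcases Nat.mod_two_eq_zero_or_one m with hp | hp <;> simp [hp, List.getLast?_append]

theorem shl_one (a : Int) : a <<< (1 : Nat) = a * 2 := by
  rw [Int.shiftLeft_eq]; ring

theorem shift_half (a k : Nat) : ((a : Int)) >>> (k + 1) = (((a / 2 : Nat)) : Int) >>> k := by
  rw [← Int.natCast_shiftRight, ← Int.natCast_shiftRight, Nat.shiftRight_succ_inside]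

theorem pyGet_neg_one {α : Type} (xs : List α) (h : xs ≠ []) :
    PySem.List.pyGet? xs (-1) = xs.getLast? := by
  have hl : xs.length ≠ 0 := by simpa [List.length_eq_zero_iff] using h
  have hidx : PySem.List.pyIdx? xs.length (-1) = some (xs.length - 1) := by
    simp only [PySem.List.pyIdx?]
    split_ifs with h1 h2 <;> first
      | rfl
      | (exfalso; omega)
  simp [PySem.List.pyGet?, hidx, List.getLast?_eq_getElem?]

theorem sorted_set_same (a : Int) :
    PySem.List.sorted (PySem.Set.ofList [a, a]) (fun x => x) false = [a] := by
  have e1 : PySem.Set.add ([] : List Int) a = [a] := by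
    rw [PySem.Set.add_of_not_mem (by simp)]; rfl
  have e2 : PySem.Set.add [a] a = [a] := PySem.Set.add_of_mem (by simp)
  have h1 : PySem.Set.ofList [a, a] = [a] := by
    rw [PySem.Set.ofList_eq_foldl]; simp only [List.foldl]; rw [e1, e2]
  rw [h1]
  have hp1 : List.Pairwise (fun x y : Int => x ≤ y) [a] := by simp
  exact PySem.List.sorted_eq_self_of_pairwise _ _ hp1

theorem sorted_set_pair (a b : Int) (h : a < b) :
    PySem.List.sorted (PySem.Set.ofList [a, b]) (fun x => x) false = [a, b] := by
  have e1 : PySem.Set.add ([] : List Int) a = [a] := by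
    rw [PySem.Set.add_of_not_mem (by simp)]; rfl
  have e2 : PySem.Set.add [a] b = [a, b] := by
    rw [PySem.Set.add_of_not_mem (by simp; omega)]; rfl
  have h1 : PySem.Set.ofList [a, b] = [a, b] := by
    rw [PySem.Set.ofList_eq_foldl]; simp only [List.foldl]; rw [e1, e2]
  rw [h1]
  have hp2 : List.Pairwise (fun x y : Int => x ≤ y) [a, b] := by simp [le_of_lt h]
  exact PySem.List.sorted_eq_self_of_pairwise _ _ hp2

theorem cbd_loop_spec (fuel : Nat) : ∀ (num c : Int), 0 ≤ num → num.toNat < fuel →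
    cbd_loop fuel num 1 1 c = c + (PySem.Int.bitLength num : Int) := by
  induction fuel with
  | zero => intro num c h0 hf; omega
  | succ fuel ih =>
    intro num c h0 hf
    simp only [cbd_loop]
    by_cases hz : num = 0
    · simp [hz, PySem.Int.bitLength_zero]
    · have hpos : (0 : Int) < num := by omega
      have hfd : PySem.Int.floordiv num 2 = num / 2 := PySem.Int.floordiv_eq_ediv_of_pos (by omega)
      rw [if_neg hz]
      rw [ih _ _ (by rw [hfd]; omega) (by rw [hfd]; omega), PySem.Int.bitLength_of_pos hpos]
      have hm2 : PySem.Int.mod num 2 = num % 2 := PySem.Int.mod_eq_emod_of_pos (by omega)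
      have hx0 : PySem.Int.bxor 1 0 = 1 := by decide
      have hx1 : PySem.Int.bxor 1 1 = 0 := by decide
      rw [hm2]
      rcases Int.emod_two_eq num with h | h <;> rw [h] <;>
        [rw [hx0]; rw [hx1]] <;> push_cast <;> ring

theorem cbd_eq_bitLength (num : Int) (h : 0 ≤ num) :
    count_binary_digits num 1 1 = (PySem.Int.bitLength num : Int) := by
  simpa using cbd_loop_spec (num.toNat + 1) num 0 h (by omega)

-- the descending tail B's loop accumulates: chain m read back-to-front without the leading 1
def dtail (m : Nat) : List Int :=
  if m ≤ 1 then []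
  else (if m % 2 = 1 then [(m : Int), (m : Int) - 1] else [(m : Int)]) ++ dtail (m / 2)
termination_by m
decreasing_by omega

theorem dtail_rec (m : Nat) (h : 2 ≤ m) :
    dtail m = (if m % 2 = 1 then [(m : Int), (m : Int) - 1] else [(m : Int)]) ++ dtail (m / 2) := by
  rw [dtail]; simp [show ¬ m ≤ 1 by omega]

theorem chain_eq_dtail (m : Nat) (h : 1 ≤ m) : chain m = (dtail m ++ [1]).reverse := by
  induction m using Nat.strong_induction_on with
  | _ m ih =>
    by_cases h1 : m = 1
    · subst h1; rw [chain, dtail]; simp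
    · have h2 : 2 ≤ m := by omega
      rw [chain_rec m h2, dtail_rec m h2, ih (m / 2) (by omega) (by omega)]
      rcases Nat.mod_two_eq_zero_or_one m with hp | hp <;> simp [hp]

theorem cds_descend_spec (fuel : Nat) : ∀ (m : Nat) (out : List Int), 1 ≤ m → m < fuel →
    cds_descend fuel (m : Int) out = (1, out ++ dtail m) := by
  induction fuel with
  | zero => intro m out h1 hf; omega
  | succ fuel ih =>
    intro m out h1 hf
    simp only [cds_descend]
    by_cases hm : m = 1
    · subst hm; rw [if_neg (by norm_num), dtail]; simp
    · have h2 : 2 ≤ m := by omega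
      rw [if_pos (by exact_mod_cast h2)]
      have hfd : PySem.Int.floordiv (m : Int) 2 = ((m / 2 : Nat) : Int) := by
        exact_mod_cast PySem.Int.floordiv_natCast m 2
      have hmod : PySem.Int.mod (m : Int) 2 = ((m % 2 : Nat) : Int) := by
        exact_mod_cast PySem.Int.mod_natCast m 2
      rw [hfd, hmod, ih (m / 2) _ (by omega) (by omega), dtail_rec m h2]
      rcases Nat.mod_two_eq_zero_or_one m with hp | hp <;> simp [hp]

theorem B_eq_chain (m : Nat) : construct_doubling_sequence_alt (m : Int) = chain m := by
  by_cases h0 : m = 0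
  · subst h0
    rw [show ((0 : Nat) : Int) = 0 by norm_num, construct_doubling_sequence_alt,
      show chain 0 = [] from by rw [chain]; simp]
    decide
  · have h1 : 1 ≤ m := by omega
    rw [construct_doubling_sequence_alt]
    have hfuel : m < ((m : Int)).toNat + 1 := by simp
    rw [cds_descend_spec _ m [] h1 hfuel]
    rw [chain_eq_dtail m h1]
    simp

theorem foldA (m : Nat) (hm : 0 < m) : ∀ (L : Nat), L = PySem.Int.bitLength (m : Int) →
    (PySem.List.pyRange 1 ((L : Int) + 1) 1).foldl
      (fun (ret : List Int) j =>
        let shift := (L : Int) - j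
        ret ++ PySem.List.sorted
          (PySem.Set.ofList
            [if ret.length ≠ 0 then ((PySem.List.pyGet? ret (-1)).getD 0) <<< (1 : Nat) else 1,
             (m : Int) >>> shift.toNat])
          (fun x => x) false)
      [] = chain m := by
  induction m using Nat.strong_induction_on with
  | _ m ih =>
    intro L hL
    by_cases h1 : m = 1
    · subst h1
      rw [show PySem.Int.bitLength ((1 : Nat) : Int) = 1 from by norm_num; decide] at hL
      subst hL
      rw [show chain 1 = [1] from by rw [chain]; simp]
      decide
    · have h2 : 2 ≤ m := by have := hm; omega
      have hhalf : (0 : Nat) < m / 2 := by omega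
      have hbl : PySem.Int.bitLength (m : Int) =
          PySem.Int.bitLength ((m / 2 : Nat) : Int) + 1 := PySem.Int.bitLength_natCast hm
      set Lh := PySem.Int.bitLength ((m / 2 : Nat) : Int) with hLh
      have hL1 : 1 ≤ Lh := by
        have := PySem.Int.bitLength_natCast hhalf; omega
      have hLr : L = Lh + 1 := by rw [hL, hbl]
      subst hLr
      have hc : ((Lh + 1 : Nat) : Int) = (Lh : Int) + 1 := by push_cast; ring
      rw [hc]
      rw [PySem.List.pyRange_one_succ_right (by omega : (1 : Int) ≤ (Lh : Int) + 1)]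
      rw [List.foldl_append]
      have hfirst : (PySem.List.pyRange 1 ((Lh : Int) + 1) 1).foldl
          (fun (ret : List Int) j =>
            let shift := (Lh : Int) + 1 - j
            ret ++ PySem.List.sorted
              (PySem.Set.ofList
                [if ret.length ≠ 0 then ((PySem.List.pyGet? ret (-1)).getD 0) <<< (1 : Nat) else 1,
                 (m : Int) >>> shift.toNat])
              (fun x => x) false)
          [] = chain (m / 2) := by
        rw [PySem.List.foldl_congr_mem _ _
          (fun (ret : List Int) j =>
            let shift := (Lh : Int) - j
            ret ++ PySem.List.sorted
              (PySem.Set.ofList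
                [if ret.length ≠ 0 then ((PySem.List.pyGet? ret (-1)).getD 0) <<< (1 : Nat) else 1,
                 ((m / 2 : Nat) : Int) >>> shift.toNat])
              (fun x => x) false)
          [] ?_]
        · exact ih (m / 2) (by omega) hhalf Lh rfl
        · intro acc x hx
          have hx' := PySem.List.mem_pyRange_one.mp hx
          have hk : ((Lh : Int) + 1 - x).toNat = ((Lh : Int) - x).toNat + 1 := by omega
          simp only
          rw [hk, shift_half]
      rw [hfirst]
      have hlast := chain_last (m / 2) (by omega)
      have hne : chain (m / 2) ≠ [] := by
        intro hn; rw [hn] at hlast; simp at hlast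
      have hlen : (chain (m / 2)).length ≠ 0 := by
        simpa [List.length_eq_zero_iff] using hne
      simp only [List.foldl_cons, List.foldl_nil]
      rw [if_pos hlen, pyGet_neg_one _ hne, hlast]
      have hsh : ((Lh : Int) + 1 - ((Lh : Int) + 1)).toNat = 0 := by omega
      rw [hsh, Int.shiftRight_zero]
      rw [chain_rec m h2]
      rcases Nat.mod_two_eq_zero_or_one m with hp | hp
      · have hv : ((m / 2 : Nat) : Int) <<< (1 : Nat) = (m : Int) := by
          rw [shl_one]
          have hmm : m / 2 * 2 = m := by omega
          exact_mod_cast congrArg (Nat.cast : Nat → Int) hmm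
        rw [Option.getD_some, hv, sorted_set_same]
        simp [hp]
      · have hv : ((m / 2 : Nat) : Int) <<< (1 : Nat) = (m : Int) - 1 := by
          rw [shl_one]
          have h3 : m / 2 * 2 + 1 = m := by omega
          have h4 := congrArg (Nat.cast : Nat → Int) h3
          push_cast at h4; omega
        rw [Option.getD_some, hv, sorted_set_pair ((m : Int) - 1) (m : Int) (by omega)]
        simp [hp]

theorem A_eq_chain (m : Nat) : construct_doubling_sequence (m : Int) = chain m := by
  by_cases h0 : m = 0
  · subst h0; rw [show ((0 : Nat) : Int) = 0 by norm_num]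
    rw [show chain 0 = [] from by rw [chain]; simp]
    decide
  · have hm : 0 < m := by omega
    simp only [construct_doubling_sequence]
    rw [cbd_eq_bitLength _ (by exact_mod_cast Nat.zero_le m)]
    exact foldA m hm _ rfl

-- ===== VERDICT (by name: the statement is the Claim_ definition above) =====
theorem construct_doubling_sequence_spec : Claim_equal_construct_doubling_sequence := by
  intro target _ hpre
  unfold Spec_construct_doubling_sequence
  have h : target = ((target.toNat : Nat) : Int) := by
    unfold Pre_construct_doubling_sequence at hpre; omega
  rw [h, A_eq_chain, B_eq_chain]
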